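-- pv_equiv track=rewrite | github.com/HumanDuck23/Helix | helix.py | number_to_codon
-- ===== SOURCE A (Python) =====
-- def number_to_codon(number: int, signed: bool = False) -> str:
--     """
--     Converts a number to its codon counterpart
--     :param number:
--     :return:
--     """
--     if not signed:
--         if not (0 <= number <= 63):
--             raise ValueError(f"Number to be converted ({number}) is not in the allowed unsigned range!!! >:(")
--
--         mapping = ['A', 'C', 'G', 'T']
--
--         x = number // 16  # Most significant digit
--         y = (number % 16) // 4  # Middle digit
--         z = number % 4  # Least significant digit
--
--         return mapping[x] + mapping[y] + mapping[z]
--     else: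
--         if not (-32 <= number <= 31):
--             raise ValueError(f"Number to be converted ({number}) is not in the allowed signed range!!! >:(")
--
--         unsigned_value = number if number >= 0 else number + 64
--         return number_to_codon(unsigned_value)
-- ===== SOURCE B (Python) =====
-- _CODON_TABLE = [a + b + c for a in 'ACGT' for b in 'ACGT' for c in 'ACGT']
--
--
-- def number_to_codon(number: int, signed: bool = False) -> str:
--     if not signed:
--         if not (0 <= number <= 63):
--             raise ValueError(f"Number to be converted ({number}) is not in the allowed unsigned range!!! >:(")
--         return _CODON_TABLE[number]
--     else:
--         if not (-32 <= number <= 31):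
--             raise ValueError(f"Number to be converted ({number}) is not in the allowed signed range!!! >:(")
--         return _CODON_TABLE[number if number >= 0 else number + 64]
-- ===== Notes on version B (the rewrite author's own statement) =====
-- stated objective: simpler
-- what changed: Replaces A's per-call digit arithmetic (//16, %16//4, %4 into a 4-letter map) and the signed branch's recursive call with a precomputed 64-entry codon table indexed directly (with the signed offset applied inline).
import Mathlib
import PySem

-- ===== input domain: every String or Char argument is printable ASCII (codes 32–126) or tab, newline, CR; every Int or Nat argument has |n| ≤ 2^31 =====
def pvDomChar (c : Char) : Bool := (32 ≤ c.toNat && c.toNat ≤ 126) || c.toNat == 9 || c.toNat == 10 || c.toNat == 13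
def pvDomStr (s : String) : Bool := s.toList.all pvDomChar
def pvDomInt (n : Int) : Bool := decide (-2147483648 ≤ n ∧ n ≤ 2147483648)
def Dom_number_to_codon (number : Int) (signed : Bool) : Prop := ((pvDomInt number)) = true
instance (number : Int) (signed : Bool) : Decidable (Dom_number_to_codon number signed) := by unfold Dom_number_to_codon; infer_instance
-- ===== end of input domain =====

-- B replaces A's per-digit arithmetic and recursion with one precomputed 64-entry codon table indexed directly (objective: simpler).

-- ===== PORT A =====
-- A raises ValueError outside its range checks; those inputs are excluded by Pre_ below
-- (the "" on those branches is never claimed about).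
def number_to_codon : Int → Bool → String
  | number, false =>
    if ¬(0 ≤ number ∧ number ≤ 63) then ""  -- raise ValueError (outside Pre_)
    else
      let mapping : List String := ["A", "C", "G", "T"]
      let x := PySem.Int.floordiv number 16
      let y := PySem.Int.floordiv (PySem.Int.mod number 16) 4
      let z := PySem.Int.mod number 4
      ((PySem.List.pyGet? mapping x).getD "") ++ ((PySem.List.pyGet? mapping y).getD "") ++ ((PySem.List.pyGet? mapping z).getD "")
  | number, true =>
    if ¬(-32 ≤ number ∧ number ≤ 31) then ""  -- raise ValueError (outside Pre_)
    else
      let unsigned_value := if number ≥ 0 then number else number + 64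
      number_to_codon unsigned_value false
termination_by _ signed => if signed then 1 else 0
decreasing_by decide

-- ===== PORT B =====
-- _CODON_TABLE = [a + b + c for a in 'ACGT' for b in 'ACGT' for c in 'ACGT']
def codonTable : List String :=
  ["A", "C", "G", "T"].flatMap fun a =>
    ["A", "C", "G", "T"].flatMap fun b =>
      ["A", "C", "G", "T"].map fun c => a ++ b ++ c

def number_to_codon_alt (number : Int) (signed : Bool) : String :=
  if !signed then
    if ¬(0 ≤ number ∧ number ≤ 63) then ""  -- raise ValueError (outside Pre_)
    else (PySem.List.pyGet? codonTable number).getD ""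
  else
    if ¬(-32 ≤ number ∧ number ≤ 31) then ""  -- raise ValueError (outside Pre_)
    else (PySem.List.pyGet? codonTable (if number ≥ 0 then number else number + 64)).getD ""

-- ===== PRECONDITION & SPEC =====
-- Pre_ excludes exactly the inputs on which A raises ValueError (out-of-range numbers).
def Pre_number_to_codon (number : Int) (signed : Bool) : Prop :=
  if signed then -32 ≤ number ∧ number ≤ 31 else 0 ≤ number ∧ number ≤ 63
instance (number : Int) (signed : Bool) : Decidable (Pre_number_to_codon number signed) := by
  unfold Pre_number_to_codon; infer_instance
def pvWitness_number_to_codon : Int × Bool := (42, false)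

def Spec_number_to_codon (number : Int) (signed : Bool) (out : String) : Prop := out = number_to_codon_alt number signed
instance (number : Int) (signed : Bool) (out : String) : Decidable (Spec_number_to_codon number signed out) := by unfold Spec_number_to_codon; infer_instance

-- ===== CLAIM (what is proved, stated in full; the proofs are below) =====
def Claim_equal_number_to_codon : Prop := ∀ (number : Int) (signed : Bool), Dom_number_to_codon number signed → Pre_number_to_codon number signed → Spec_number_to_codon number signed (number_to_codon number signed)

-- ===== LEMMAS AND PROOFS =====
theorem unsigned_agree (n : Int) (h0 : 0 ≤ n) (h1 : n ≤ 63) :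
    number_to_codon n false = number_to_codon_alt n false := by
  interval_cases n <;> simp only [number_to_codon] <;> decide

-- ===== VERDICT (by name: the statement is the Claim_ definition above) =====
theorem number_to_codon_spec : Claim_equal_number_to_codon := by
  intro number signed _ hp
  unfold Spec_number_to_codon
  cases signed with
  | false =>
    simp only [Pre_number_to_codon, if_neg Bool.false_ne_true] at hp
    exact unsigned_agree number hp.1 hp.2
  | true =>
    simp only [Pre_number_to_codon, if_pos] at hp
    obtain ⟨h0, h1⟩ := hp
    show number_to_codon number true = _
    rw [number_to_codon]
    rw [if_neg (by omega : ¬¬(-32 ≤ number ∧ number ≤ 31))]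
    simp only []
    by_cases hn : number ≥ 0
    · rw [if_pos hn, unsigned_agree number hn (by omega)]
      simp [number_to_codon_alt, hn, h0, h1, show 0 ≤ number ∧ number ≤ 63 by omega]
    · rw [if_neg hn, unsigned_agree (number + 64) (by omega) (by omega)]
      simp only [number_to_codon_alt, Bool.not_false, Bool.not_true]
      simp [hn, show 0 ≤ number + 64 ∧ number + 64 ≤ 63 by omega,
            show -32 ≤ number ∧ number ≤ 31 by omega]
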